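-- pv_equiv track=rewrite | github.com/Run396/Advent-of-Code | day2/day2.py | check
-- ===== SOURCE A (Python) =====
-- pos_control = [1,2,3]
--
-- neg_control = [-1,-2,-3]
--
-- def check(rep):
--     flag = False
--     all_same = 0
--     for i in range(len(rep)-1):
--
--         diff = int(rep[i]) - int(rep[i+1])
--         if diff in pos_control and all_same == 0:
--             flag = True
--
--         if diff in pos_control and flag == True:
--             all_same += 1
--         if diff in neg_control and flag == False:
--             all_same += 1
--
--
--     if all_same == len(rep) -1:
--         return 1
--     else:
--         return 0
-- ===== SOURCE B (Python) =====
-- def _ok(xs, lo, hi):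
--     # verify every adjacent difference lies in [lo, hi], bailing out at the first violation
--     for a, b in zip(xs, xs[1:]):
--         if not (lo <= a - b <= hi):
--             return False
--     return True
--
-- def check(rep):
--     if len(rep) < 2:
--         return 1
--     d = rep[0] - rep[1]
--     if 1 <= d <= 3:
--         lo, hi = 1, 3
--     elif -3 <= d <= -1:
--         lo, hi = -3, -1
--     else:
--         return 0
--     return 1 if _ok(rep, lo, hi) else 0
-- ===== Notes on version B (the rewrite author's own statement) =====
-- stated objective: alternative
-- what changed: Replaces A's single fold with a flag/counter state tested against len(rep)-1 by a direction-commit recursion: the first difference chooses the increasing band 1..3 or the decreasing band -3..-1 (or rejects immediately), then one recursive pass with early exit checks only that band.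
-- intended difference: On the empty report A returns 0 (its counter 0 never equals len(rep)-1 = -1), while B returns 1 (an empty sequence of differences is vacuously monotonic, matching A's own value 1 for one-element reports), which is the intended reading. — e.g. on check([]): A returns 0, B returns 1
import Mathlib
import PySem

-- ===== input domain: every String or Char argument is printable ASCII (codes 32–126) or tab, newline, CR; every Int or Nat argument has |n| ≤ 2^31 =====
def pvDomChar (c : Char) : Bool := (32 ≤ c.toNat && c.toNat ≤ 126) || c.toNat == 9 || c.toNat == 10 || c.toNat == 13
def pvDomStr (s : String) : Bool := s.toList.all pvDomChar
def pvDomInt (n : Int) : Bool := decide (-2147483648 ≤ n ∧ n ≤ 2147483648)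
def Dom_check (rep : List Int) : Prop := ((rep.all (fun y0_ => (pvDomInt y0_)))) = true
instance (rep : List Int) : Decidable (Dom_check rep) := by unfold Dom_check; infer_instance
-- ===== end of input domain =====

-- B replaces A's flag/counter fold (counter compared with len(rep)-1) by a direction-commit
-- recursion: the first difference picks the band [1,3] or [-3,-1] (or rejects at once), then one
-- early-exit recursive pass checks only that band; alternative decomposition, same O(n) cost.

-- ===== PORT A =====
def posControl : List Int := [1, 2, 3]
def negControl : List Int := [-1, -2, -3]

-- one iteration of A's loop body, on the state (flag, all_same)
def checkStep (st : Bool × Int) (diff : Int) : Bool × Int :=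
  let flag := st.1
  let all_same := st.2
  let flag := if diff ∈ posControl ∧ all_same = 0 then true else flag
  let all_same := if diff ∈ posControl ∧ flag = true then all_same + 1 else all_same
  let all_same := if diff ∈ negControl ∧ flag = false then all_same + 1 else all_same
  (flag, all_same)

def check (rep : List Int) : Int :=
  let st := (PySem.List.pyRange 0 ((rep.length : Int) - 1) 1).foldl
    (fun st i => checkStep st (PySem.List.pyGetD rep i 0 - PySem.List.pyGetD rep (i + 1) 0))
    (false, 0)
  if st.2 = (rep.length : Int) - 1 then 1 else 0

-- ===== PORT B =====
-- recursively verify every adjacent difference lies in [lo, hi] (early exit)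
def okBand : List Int → Int → Int → Bool
  | a :: b :: rest, lo, hi =>
      (decide (lo ≤ a - b ∧ a - b ≤ hi)) && okBand (b :: rest) lo hi
  | _, _, _ => true

def check_alt (rep : List Int) : Int :=
  match rep with
  | [] => 1
  | [_] => 1
  | a :: b :: rest =>
      let d := a - b
      if 1 ≤ d ∧ d ≤ 3 then (if okBand (a :: b :: rest) 1 3 then 1 else 0)
      else if -3 ≤ d ∧ d ≤ -1 then (if okBand (a :: b :: rest) (-3) (-1) then 1 else 0)
      else 0

-- ===== PRECONDITION & SPEC =====
-- On the empty report A returns 0 (its counter 0 never equals len(rep)-1 = -1), while B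
-- returns 1 (an empty sequence of differences is vacuously monotonic, matching A's own
-- value 1 for one-element reports), which is the intended reading.
def D_check (rep : List Int) : Prop := rep = []
instance (rep : List Int) : Decidable (D_check rep) := by unfold D_check; infer_instance

def Spec_check (rep : List Int) (out : Int) : Prop := ¬ D_check rep → out = check_alt rep
instance (rep : List Int) (out : Int) : Decidable (Spec_check rep out) := by unfold Spec_check; infer_instance

def pvDiffWitness_check : List Int := []
def pvDiffWitnessOut_check : Int × Int := (0, 1)

-- ===== CLAIM (what is proved, stated in full; the proofs are below) =====
def Claim_unchanged_check : Prop := ∀ (rep : List Int), Dom_check rep → Spec_check rep (check rep)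
def Claim_changed_check : Prop := Dom_check (pvDiffWitness_check) ∧ D_check (pvDiffWitness_check) ∧ check (pvDiffWitness_check) = pvDiffWitnessOut_check.1 ∧ check_alt (pvDiffWitness_check) = pvDiffWitnessOut_check.2 ∧ pvDiffWitnessOut_check.1 ≠ pvDiffWitnessOut_check.2
def Claim_exact_check : Prop := ∀ (rep : List Int), Dom_check rep → D_check rep → check rep ≠ check_alt rep

-- ===== LEMMAS AND PROOFS =====

lemma mem_posControl (d : Int) : d ∈ posControl ↔ (1 ≤ d ∧ d ≤ 3) := by
  simp [posControl]; omega

lemma mem_negControl (d : Int) : d ∈ negControl ↔ (-3 ≤ d ∧ d ≤ -1) := by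
  simp [negControl]; omega

-- each loop iteration increments all_same by 0 or 1
lemma checkStep_snd (st : Bool × Int) (d : Int) :
    (checkStep st d).2 = st.2 ∨ (checkStep st d).2 = st.2 + 1 := by
  simp only [checkStep]
  split_ifs <;> simp_all

-- all_same grows by at most the number of remaining iterations
lemma foldl_snd_le (ds : List Int) : ∀ (st : Bool × Int),
    (ds.foldl checkStep st).2 ≤ st.2 + ds.length := by
  induction ds with
  | nil => intro st; simp
  | cons d ds ih =>
    intro st
    have h := checkStep_snd st d
    have h2 := ih (checkStep st d)
    simp only [List.foldl_cons, List.length_cons]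
    push_cast
    omega

-- once flag is true, all_same just counts the positive-control diffs
lemma foldl_flag_true (ds : List Int) : ∀ (c : Int),
    ds.foldl checkStep (true, c) =
      (true, c + (ds.countP (fun d => decide (d ∈ posControl)) : Int)) := by
  induction ds with
  | nil => intro c; simp
  | cons d ds ih =>
    intro c
    have hstep : checkStep (true, c) d =
        (true, if d ∈ posControl then c + 1 else c) := by
      simp only [checkStep]
      split_ifs <;> simp_all
    simp only [List.foldl_cons, hstep]
    split_ifs with h
    · rw [ih]; simp [h]; ring
    · rw [ih]; simp [h]

-- with flag false and all_same ≥ 1, all_same just counts the negative-control diffs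
lemma foldl_flag_false (ds : List Int) : ∀ (c : Int), 1 ≤ c →
    ds.foldl checkStep (false, c) =
      (false, c + (ds.countP (fun d => decide (d ∈ negControl)) : Int)) := by
  induction ds with
  | nil => intro c _; simp
  | cons d ds ih =>
    intro c hc
    have hstep : checkStep (false, c) d =
        (false, if d ∈ negControl then c + 1 else c) := by
      simp only [checkStep]
      split_ifs <;> simp_all
    simp only [List.foldl_cons, hstep]
    split_ifs with h
    · rw [ih (c + 1) (by omega)]; simp [h]; ring
    · rw [ih c hc]; simp [h]

-- characterisation of A's final counter
lemma foldl_eq_length_iff (ds : List Int) :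
    ((ds.foldl checkStep (false, 0)).2 = (ds.length : Int)) ↔
      ((∀ d ∈ ds, 1 ≤ d ∧ d ≤ 3) ∨ (∀ d ∈ ds, -3 ≤ d ∧ d ≤ -1)) := by
  cases ds with
  | nil => simp
  | cons d ds =>
    by_cases hp : d ∈ posControl
    · have hstep : checkStep (false, 0) d = (true, 1) := by
        simp only [checkStep]; split_ifs <;> simp_all
      have hcount : ds.countP (fun d => decide (d ∈ posControl)) ≤ ds.length :=
        List.countP_le_length
      have hiff := List.countP_eq_length (l := ds) (p := fun d => decide (d ∈ posControl))
      constructor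
      · intro h
        simp only [List.foldl_cons, hstep, foldl_flag_true, List.length_cons] at h
        left
        intro x hx
        rcases List.mem_cons.1 hx with hx | hx
        · rw [mem_posControl] at hp; omega
        · have : ds.countP (fun d => decide (d ∈ posControl)) = ds.length := by omega
          have := hiff.1 this x hx
          simpa [mem_posControl] using this
      · intro h
        rcases h with h | h
        · have : ds.countP (fun d => decide (d ∈ posControl)) = ds.length := by
            apply hiff.2
            intro x hx
            simpa [mem_posControl] using h x (by simp [hx])
          simp only [List.foldl_cons, hstep, foldl_flag_true, List.length_cons, this]
          push_cast
          ring
        · exfalso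
          have := h d (by simp)
          rw [mem_posControl] at hp
          omega
    · by_cases hn : d ∈ negControl
      · have hstep : checkStep (false, 0) d = (false, 1) := by
          simp only [checkStep]; split_ifs <;> simp_all
        have hcount : ds.countP (fun d => decide (d ∈ negControl)) ≤ ds.length :=
          List.countP_le_length
        have hiff := List.countP_eq_length (l := ds) (p := fun d => decide (d ∈ negControl))
        constructor
        · intro h
          simp only [List.foldl_cons, hstep, List.length_cons] at h
          rw [foldl_flag_false ds 1 (by omega)] at h
          right
          intro x hx
          rcases List.mem_cons.1 hx with hx | hx
          · rw [mem_negControl] at hn; omega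
          · have : ds.countP (fun d => decide (d ∈ negControl)) = ds.length := by
              simp at h; omega
            have := hiff.1 this x hx
            simpa [mem_negControl] using this
        · intro h
          rcases h with h | h
          · exfalso
            have := h d (by simp)
            rw [mem_posControl] at hp
            omega
          · have : ds.countP (fun d => decide (d ∈ negControl)) = ds.length := by
              apply hiff.2
              intro x hx
              simpa [mem_negControl] using h x (by simp [hx])
            simp only [List.foldl_cons, hstep, List.length_cons]
            rw [foldl_flag_false ds 1 (by omega), this]
            simp; ring
      · -- head diff breaks both monotonicity tests; counter can never catch up
        have hstep : checkStep (false, 0) d = (false, 0) := by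
          simp only [checkStep]; split_ifs <;> simp_all
        constructor
        · intro h
          exfalso
          simp only [List.foldl_cons, hstep, List.length_cons] at h
          have := foldl_snd_le ds (false, 0)
          simp at this
          omega
        · intro h
          exfalso
          rw [mem_posControl] at hp
          rw [mem_negControl] at hn
          rcases h with h | h <;> have := h d (by simp) <;> omega

-- the index loop over pyRange computes exactly the diffs list
lemma map_range_eq_diffs (rep : List Int) :
    (PySem.List.pyRange 0 ((rep.length : Int) - 1) 1).map
        (fun i => PySem.List.pyGetD rep i 0 - PySem.List.pyGetD rep (i + 1) 0) =
      List.zipWith (fun a b => a - b) rep (rep.drop 1) := by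
  cases rep with
  | nil => simp [PySem.List.pyRange_one_eq_nil]
  | cons a rest =>
    have hlen : ((a :: rest).length : Int) - 1 = ((rest.length : Nat) : Int) := by
      simp
    rw [hlen, PySem.List.pyRange_zero_natCast, List.map_map]
    apply List.ext_getElem
    · simp [List.length_zipWith]
    · intro k h1 h2
      simp only [List.getElem_map, List.getElem_range, Function.comp_apply]
      have hk : k < rest.length := by simpa using h1
      have hget1 : PySem.List.pyGetD (a :: rest) (k : Int) 0 = (a :: rest)[k]'(by simp; omega) := by
        rw [PySem.List.pyGetD_natCast]
        exact List.getD_eq_getElem _ _ _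
      have hget2 : PySem.List.pyGetD (a :: rest) ((k : Int) + 1) 0 = (a :: rest)[k + 1]'(by simp; omega) := by
        have : ((k : Int) + 1) = ((k + 1 : Nat) : Int) := by push_cast; ring
        rw [this, PySem.List.pyGetD_natCast]
        exact List.getD_eq_getElem _ _ _
      rw [hget1, hget2]
      simp [List.getElem_zipWith]

-- B's recursive band check accepts exactly 'every adjacent difference in [lo, hi]'
lemma okBand_iff (xs : List Int) (lo hi : Int) :
    okBand xs lo hi = true ↔
      ∀ d ∈ List.zipWith (fun a b => a - b) xs (xs.drop 1), lo ≤ d ∧ d ≤ hi := by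
  induction xs with
  | nil => simp [okBand]
  | cons a xs ih =>
    cases xs with
    | nil => simp [okBand]
    | cons b rest =>
      simp only [okBand, Bool.and_eq_true, decide_eq_true_eq, List.drop_succ_cons,
        List.drop_zero, List.zipWith_cons_cons, List.mem_cons]
      rw [ih]
      constructor
      · rintro ⟨h1, h2⟩ d hd
        rcases hd with hd | hd
        · subst hd; exact h1
        · exact h2 d (by simpa using hd)
      · intro h
        exact ⟨h _ (Or.inl rfl), fun d hd => h d (Or.inr (by simpa using hd))⟩

-- B's value on a report with at least two levels, in terms of the diffs list
lemma check_alt_cons (a b : Int) (rest : List Int) :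
    check_alt (a :: b :: rest) =
      if ((∀ d ∈ List.zipWith (fun a b => a - b) (a :: b :: rest) ((a :: b :: rest).drop 1), 1 ≤ d ∧ d ≤ 3) ∨
          (∀ d ∈ List.zipWith (fun a b => a - b) (a :: b :: rest) ((a :: b :: rest).drop 1), -3 ≤ d ∧ d ≤ -1))
      then 1 else 0 := by
  have hmem : (a - b) ∈ List.zipWith (fun a b => a - b) (a :: b :: rest) ((a :: b :: rest).drop 1) := by
    simp
  by_cases h1 : 1 ≤ a - b ∧ a - b ≤ 3
  · have e : check_alt (a :: b :: rest) = if okBand (a :: b :: rest) 1 3 then 1 else 0 := by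
      simp only [check_alt]; rw [if_pos h1]
    rw [e]
    by_cases hP : ∀ d ∈ List.zipWith (fun a b => a - b) (a :: b :: rest) ((a :: b :: rest).drop 1), 1 ≤ d ∧ d ≤ 3
    · rw [if_pos ((okBand_iff _ _ _).mpr hP), if_pos (Or.inl hP)]
    · have hok : ¬ okBand (a :: b :: rest) 1 3 = true := fun hc => hP ((okBand_iff _ _ _).mp hc)
      rw [if_neg hok, if_neg ?_]
      rintro (hp | hn)
      · exact hP hp
      · have := hn _ hmem; omega
  · by_cases h2 : -3 ≤ a - b ∧ a - b ≤ -1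
    · have e : check_alt (a :: b :: rest) = if okBand (a :: b :: rest) (-3) (-1) then 1 else 0 := by
        simp only [check_alt]; rw [if_neg h1, if_pos h2]
      rw [e]
      by_cases hN : ∀ d ∈ List.zipWith (fun a b => a - b) (a :: b :: rest) ((a :: b :: rest).drop 1), -3 ≤ d ∧ d ≤ -1
      · rw [if_pos ((okBand_iff _ _ _).mpr hN), if_pos (Or.inr hN)]
      · have hok : ¬ okBand (a :: b :: rest) (-3) (-1) = true := fun hc => hN ((okBand_iff _ _ _).mp hc)
        rw [if_neg hok, if_neg ?_]
        rintro (hp | hn)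
        · have := hp _ hmem; omega
        · exact hN hn
    · have e : check_alt (a :: b :: rest) = 0 := by
        simp only [check_alt]; rw [if_neg h1, if_neg h2]
      rw [e, if_neg ?_]
      rintro (hp | hn)
      · have := hp _ hmem; omega
      · have := hn _ hmem; omega

-- ===== VERDICT (by name: the statement is the Claim_ definition above) =====
theorem check_spec : Claim_unchanged_check := by
  intro rep _ hD
  unfold check
  rw [show (PySem.List.pyRange 0 ((rep.length : Int) - 1) 1).foldl
        (fun st i => checkStep st (PySem.List.pyGetD rep i 0 - PySem.List.pyGetD rep (i + 1) 0))
        (false, 0) =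
      ((PySem.List.pyRange 0 ((rep.length : Int) - 1) 1).map
        (fun i => PySem.List.pyGetD rep i 0 - PySem.List.pyGetD rep (i + 1) 0)).foldl
        checkStep (false, 0) from List.foldl_map.symm]
  rw [map_range_eq_diffs]
  match rep with
  | [] => exact absurd rfl hD
  | [x] => simp [check_alt]
  | a :: b :: rest =>
    rw [check_alt_cons]
    have hlen : ((List.zipWith (fun a b => a - b) (a :: b :: rest) ((a :: b :: rest).drop 1)).length : Int) =
        ((a :: b :: rest).length : Int) - 1 := by
      simp [List.length_zipWith]
    dsimp only
    rw [← hlen]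
    have hiff := foldl_eq_length_iff (List.zipWith (fun a b => a - b) (a :: b :: rest) ((a :: b :: rest).drop 1))
    by_cases hQ : ((∀ d ∈ List.zipWith (fun a b => a - b) (a :: b :: rest) ((a :: b :: rest).drop 1), 1 ≤ d ∧ d ≤ 3) ∨
        (∀ d ∈ List.zipWith (fun a b => a - b) (a :: b :: rest) ((a :: b :: rest).drop 1), -3 ≤ d ∧ d ≤ -1))
    · rw [if_pos (hiff.2 hQ), if_pos hQ]
    · rw [if_neg (fun hc => hQ (hiff.1 hc)), if_neg hQ]

theorem check_changed : Claim_changed_check := by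
  unfold Claim_changed_check; decide

theorem check_tight : Claim_exact_check := by
  intro rep _ hD
  subst hD
  decide
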